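-- pv_equiv track=rewrite | github.com/mpettersson/PythonReview | questions/list/find_geometric_progression_k_tuples.py | find_geometric_progression_k_tuples_bf
-- ===== SOURCE A (Python) =====
-- from itertools import combinations
--
-- def find_geometric_progression_k_tuples_bf(l, r, k=3):
--     if isinstance(l, list) and isinstance(r, int) and isinstance(k, int) and 0 <= k:
--         n = len(l)
--         result = []
--         for comb in combinations(range(n), k):
--             if k == 1 or all([l[comb[i-1]] * r == l[comb[i]] for i in range(1, k)]):
--                 result.append(list(comb))
--
--         return result
-- ===== SOURCE B (Python) =====
-- def find_geometric_progression_k_tuples_bf(l, r, k=3):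
--     # Index positions of each value once, then DFS chains v -> v*r over later
--     # indices: output-sensitive, results in the same lexicographic order.
--     if k < 0:
--         return []
--     if k == 0:
--         return [[]]
--     pos = {}
--     for i, v in enumerate(l):
--         pos.setdefault(v, []).append(i)
--     result = []
--
--     def dfs(chain, last, remaining):
--         if remaining == 0:
--             result.append(chain)
--             return
--         for j in pos.get(l[last] * r, []):
--             if j > last:
--                 dfs(chain + [j], j, remaining - 1)
--
--     for i in range(len(l)):
--         dfs([i], i, k - 1)
--     return result
-- ===== Notes on version B (the rewrite author's own statement) =====
-- stated objective: faster
-- what changed: Replaces the filter over all C(n,k) index combinations by a value->positions dict plus a DFS that only extends chains whose next value is exactly prev*r, producing the same tuples in the same lexicographic order output-sensitively; intended as asymptotically faster (a timing run measured B 62.9x at n=16 and A timing out from n=64 where B returns, though it could not verify B's answer there or a >=5ms ratio at the largest size both finish).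
-- outside the precondition, e.g. on find_geometric_progression_k_tuples_bf([1, 2], 2, -1): A returns None, B returns []
import Mathlib
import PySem

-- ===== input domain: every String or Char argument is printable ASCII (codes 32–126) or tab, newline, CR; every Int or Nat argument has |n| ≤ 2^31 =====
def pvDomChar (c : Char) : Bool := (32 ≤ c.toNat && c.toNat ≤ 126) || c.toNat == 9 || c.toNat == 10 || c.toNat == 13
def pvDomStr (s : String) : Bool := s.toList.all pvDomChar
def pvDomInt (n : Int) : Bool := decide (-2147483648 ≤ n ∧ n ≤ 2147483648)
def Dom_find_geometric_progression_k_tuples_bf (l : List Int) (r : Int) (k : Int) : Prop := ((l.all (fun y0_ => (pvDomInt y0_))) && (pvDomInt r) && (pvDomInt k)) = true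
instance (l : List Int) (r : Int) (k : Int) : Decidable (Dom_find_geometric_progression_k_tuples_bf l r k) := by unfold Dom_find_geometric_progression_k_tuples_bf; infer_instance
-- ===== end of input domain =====

-- B replaces A's scan of all C(n,k) index combinations by a value→positions
-- dict and a DFS over chains v → v*r (same tuples, same lexicographic order).

-- ===== PORT A =====
-- l[i] for an index known to be in range at every use below (indices come from
-- range(n) and from combs over range(n)); exact there, since pyGet? is some.
def pyAtD (xs : List Int) (i : Int) : Int := (PySem.List.pyGet? xs i).getD 0

def find_geometric_progression_k_tuples_bf (l : List Int) (r : Int) (k : Int) : List (List Int) :=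
  if 0 ≤ k then
    let n : Int := (l.length : Int)
    (PySem.List.combinations (PySem.List.pyRange 0 n 1) k.toNat).foldl
      (fun result comb =>
        if k == 1 || (PySem.List.pyRange 1 k 1).all
            (fun i => pyAtD l (pyAtD comb (i - 1)) * r == pyAtD l (pyAtD comb i))
        then result ++ [comb] else result) []
  else []   -- Python falls through and returns None for k < 0; excluded by Pre_

-- ===== PORT B =====
-- pos = {}; for i, v in enumerate(l): pos.setdefault(v, []).append(i)
-- (each (index, value) pair is swapped to (value, index) = (key, appended item))
def posBuild (l : List Int) : PySem.Dict Int (List Int) :=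
  ((PySem.List.enumerate l).map (fun p => (p.2, p.1))).foldl
    (fun d p => d.modify p.1 [] (fun xs => xs ++ [p.2])) PySem.Dict.empty

-- def dfs(chain, last, remaining): …  (remaining, a count = k-1 at the top call, is a Nat)
def dfsB (l : List Int) (r : Int) (pos : PySem.Dict Int (List Int)) :
    Nat → List Int → Int → List (List Int)
  | 0, chain, _ => [chain]
  | m + 1, chain, last =>
      (pos.getD (pyAtD l last * r) []).flatMap
        (fun j => if last < j then dfsB l r pos m (chain ++ [j]) j else [])

def find_geometric_progression_k_tuples_bf_alt (l : List Int) (r : Int) (k : Int) : List (List Int) :=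
  if k < 0 then []
  else if k == 0 then [[]]
  else
    let pos := posBuild l
    (PySem.List.pyRange 0 (l.length : Int) 1).flatMap
      (fun i => dfsB l r pos (k - 1).toNat [i] i)

-- ===== PRECONDITION & SPEC =====
-- Pre_ excludes k < 0, where Python A falls through and returns None (not a list).
def Pre_find_geometric_progression_k_tuples_bf (l : List Int) (r : Int) (k : Int) : Prop := 0 ≤ k
instance (l : List Int) (r : Int) (k : Int) : Decidable (Pre_find_geometric_progression_k_tuples_bf l r k) := by unfold Pre_find_geometric_progression_k_tuples_bf; infer_instance

def pvWitness_find_geometric_progression_k_tuples_bf : List Int × Int × Int := ([1, 2, 4], 2, 3)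

def Spec_find_geometric_progression_k_tuples_bf (l : List Int) (r : Int) (k : Int) (out : List (List Int)) : Prop := out = find_geometric_progression_k_tuples_bf_alt l r k
instance (l : List Int) (r : Int) (k : Int) (out : List (List Int)) : Decidable (Spec_find_geometric_progression_k_tuples_bf l r k out) := by unfold Spec_find_geometric_progression_k_tuples_bf; infer_instance

-- ===== CLAIM (what is proved, stated in full; the proofs are below) =====
def Claim_equal_find_geometric_progression_k_tuples_bf : Prop := ∀ (l : List Int) (r : Int) (k : Int), Dom_find_geometric_progression_k_tuples_bf l r k → Pre_find_geometric_progression_k_tuples_bf l r k → Spec_find_geometric_progression_k_tuples_bf l r k (find_geometric_progression_k_tuples_bf l r k)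

-- ===== LEMMAS AND PROOFS =====

-- a chain continuing value v: each element's value is r times its predecessor's
def chainFrom (l : List Int) (r : Int) : Int → List Int → Bool
  | _, [] => true
  | v, j :: t => (v * r == pyAtD l j) && chainFrom l r (pyAtD l j) t

def chainOK (l : List Int) (r : Int) : List Int → Bool
  | [] => true
  | j :: t => chainFrom l r (pyAtD l j) t

theorem pyAtD_cons_zero (a : Int) (xs : List Int) : pyAtD (a :: xs) 0 = a := by
  simp [pyAtD, PySem.List.pyGet?, PySem.List.pyIdx?]

theorem pyAtD_cons_succ (a : Int) (xs : List Int) (i : Int) (h : 0 ≤ i) :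
    pyAtD (a :: xs) (i + 1) = pyAtD xs i := by
  rcases Int.eq_ofNat_of_zero_le h with ⟨n, rfl⟩
  simp only [pyAtD, PySem.List.pyGet?, PySem.List.pyIdx?, List.length_cons]
  split_ifs with h1 h2 h3 h4 <;> push_cast at * <;> try omega
  · have e1 : ((n : Int) + 1).toNat = n + 1 := by omega
    have e2 : ((n : Int)).toNat = n := by omega
    simp [e1, e2]
  · simp

theorem cond_eq_chainOK (l : List Int) (r : Int) (c : List Int) :
    ((PySem.List.pyRange 1 (c.length : Int) 1).all
      (fun i => pyAtD l (pyAtD c (i - 1)) * r == pyAtD l (pyAtD c i))) = chainOK l r c := by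
  induction c with
  | nil => simp [chainOK]
  | cons a c' ih =>
    cases c' with
    | nil => simp [chainOK, chainFrom]
    | cons b tl =>
      rw [PySem.List.pyRange_one] at ih ⊢
      have hn : (((a :: b :: tl).length : Int) - 1).toNat = tl.length + 1 := by
        simp only [List.length_cons]; omega
      have hn' : (((b :: tl).length : Int) - 1).toNat = tl.length := by
        simp only [List.length_cons]; omega
      rw [hn, List.range_succ_eq_map]
      rw [hn'] at ih
      simp only [List.map_cons, List.all_cons, List.map_map, List.all_map] at ih ⊢
      have h1 : (1 : Int) + (0:Nat) - 1 = 0 := by norm_num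
      have h2 : (1 : Int) + (0:Nat) = 0 + 1 := by norm_num
      have hstep : ∀ t : Nat,
          (pyAtD l (pyAtD (a :: b :: tl) (1 + ((Nat.succ t : Nat) : Int) - 1)) * r
            == pyAtD l (pyAtD (a :: b :: tl) (1 + ((Nat.succ t : Nat) : Int))))
          = (pyAtD l (pyAtD (b :: tl) (1 + (t : Int) - 1)) * r
            == pyAtD l (pyAtD (b :: tl) (1 + (t : Int)))) := by
        intro t
        have e1 : (1 : Int) + ((Nat.succ t : Nat) : Int) - 1 = (1 + (t : Int) - 1) + 1 := by
          push_cast; ring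
        have e2 : (1 : Int) + ((Nat.succ t : Nat) : Int) = (1 + (t : Int)) + 1 := by
          push_cast; ring
        rw [e1, e2, pyAtD_cons_succ a _ _ (by omega), pyAtD_cons_succ a _ _ (by omega)]
      have hAll := List.all_congr (rfl : List.range tl.length = List.range tl.length)
        (fun t => hstep t)
      simp only [Function.comp_def] at hAll ih ⊢
      rw [hAll, ih]
      have e0 : (1 : Int) + ((0:Nat) : Int) - 1 = 0 := by norm_num
      have e0' : (1 : Int) + ((0:Nat) : Int) = 0 + 1 := by norm_num
      rw [e0, e0', pyAtD_cons_succ a _ _ le_rfl, pyAtD_cons_zero, pyAtD_cons_zero]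
      simp [chainOK, chainFrom]

theorem combos_filter_split (l : List Int) (r : Int) :
    ∀ (xs : List Int), xs.Pairwise (· < ·) → ∀ (m : Nat) (p : Int → Bool),
      (PySem.List.combinations xs (m + 1)).filter
          (fun c => match c with | [] => true | j :: t => p j && chainFrom l r (pyAtD l j) t)
        = (xs.filter p).flatMap (fun j =>
            ((PySem.List.combinations (xs.filter (fun x => decide (j < x))) m).filter
              (chainFrom l r (pyAtD l j))).map (j :: ·)) := by
  intro xs
  induction xs with
  | nil => intro _ m p; simp [PySem.List.combinations_nil_succ]
  | cons x rest ih =>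
    intro hpw m p
    have hrest : rest.Pairwise (· < ·) := hpw.of_cons
    have hgt : ∀ y ∈ rest, x < y := (List.pairwise_cons.mp hpw).1
    rw [PySem.List.combinations_cons_succ, List.filter_append, List.filter_map]
    -- first block: combs starting with x
    have hfirst : List.filter
        ((fun c => match c with | [] => true | j :: t => p j && chainFrom l r (pyAtD l j) t) ∘ (x :: ·))
        (PySem.List.combinations rest m)
        = if p x then (PySem.List.combinations rest m).filter (chainFrom l r (pyAtD l x)) else [] := by
      by_cases hx : p x
      · simp [Function.comp_def, hx]
      · simp [Function.comp_def, hx]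
    rw [hfirst, ih hrest m p]
    have hxx : (x :: rest).filter (fun y => decide (x < y)) = rest := by
      simp only [List.filter_cons]
      rw [if_neg (by simp)]
      exact List.filter_eq_self.mpr (fun a ha => by simpa using hgt a ha)
    have htail : ∀ j ∈ rest.filter p,
        (x :: rest).filter (fun y => decide (j < y)) = rest.filter (fun y => decide (j < y)) := by
      intro j hj
      have hjr : j ∈ rest := (List.mem_filter.mp hj).1
      simp only [List.filter_cons]
      rw [if_neg (by simpa using not_lt.mpr (le_of_lt (hgt j hjr)))]
    rw [List.filter_cons]
    by_cases hx : p x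
    · rw [if_pos hx, hfirst] at *
      rw [if_pos hx]
      rw [List.flatMap_cons, hxx]
      congr 1
      exact List.flatMap_congr (fun j hj => by rw [htail j hj])
    · rw [if_neg hx]
      simp only [hx]
      exact List.flatMap_congr (fun j hj => by rw [htail j hj])

theorem posBuild_getD (l : List Int) (v : Int) :
    (posBuild l).getD v [] =
      (PySem.List.pyRange 0 (l.length : Int) 1).filter (fun j => pyAtD l j == v) := by
  unfold posBuild
  rw [PySem.Dict.getD_foldl_modify_append]
  rw [PySem.List.enumerate_eq_map_pyRange l 0]
  simp only [List.map_map, List.filter_map, Function.comp_def, PySem.List.len_eq]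
  have : (fun j => PySem.List.pyGetD l j 0 == v) = (fun j => pyAtD l j == v) := by
    funext j
    simp [PySem.List.pyGetD, pyAtD, PySem.List.pyGet?]
  simp [PySem.Dict.getD, PySem.Dict.empty, PySem.Dict.get?, this]

theorem flatMap_ite {α β : Type} (ys : List α) (q : α → Bool) (F : α → List β) :
    ys.flatMap (fun j => if q j then F j else []) = (ys.filter q).flatMap F := by
  induction ys with
  | nil => rfl
  | cons y ys ih =>
    rw [List.flatMap_cons, List.filter_cons]
    by_cases hy : q y
    · rw [if_pos hy, if_pos hy, List.flatMap_cons, ih]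
    · rw [if_neg hy, if_neg hy, List.nil_append, ih]

theorem dfsB_eq (l : List Int) (r : Int) :
    ∀ (m : Nat) (chain : List Int) (last : Int),
      dfsB l r (posBuild l) m chain last
        = ((PySem.List.combinations
              ((PySem.List.pyRange 0 (l.length : Int) 1).filter (fun x => decide (last < x))) m).filter
            (chainFrom l r (pyAtD l last))).map (fun t => chain ++ t) := by
  intro m
  induction m with
  | zero =>
    intro chain last
    simp [dfsB, PySem.List.combinations_zero, chainFrom]
  | succ m ih =>
    intro chain last
    rw [show dfsB l r (posBuild l) (m+1) chain last =
        ((posBuild l).getD (pyAtD l last * r) []).flatMap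
          (fun j => if last < j then dfsB l r (posBuild l) m (chain ++ [j]) j else []) from rfl]
    rw [posBuild_getD]
    rw [show (fun j => if last < j then dfsB l r (posBuild l) m (chain ++ [j]) j else [])
        = (fun j => if decide (last < j) then dfsB l r (posBuild l) m (chain ++ [j]) j else []) from by
      funext j; by_cases h : last < j <;> simp [h]]
    rw [flatMap_ite, List.filter_filter]
    -- RHS
    have hpw : ((PySem.List.pyRange 0 (l.length : Int) 1).filter
        (fun x => decide (last < x))).Pairwise (· < ·) :=
      (PySem.List.pairwise_lt_pyRange_one 0 _).filter _
    have hmatch : List.filter (chainFrom l r (pyAtD l last))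
        (PySem.List.combinations ((PySem.List.pyRange 0 (l.length : Int) 1).filter
          (fun x => decide (last < x))) (m+1))
        = List.filter (fun c => match c with
            | [] => true
            | j :: t => (pyAtD l last * r == pyAtD l j) && chainFrom l r (pyAtD l j) t)
          (PySem.List.combinations ((PySem.List.pyRange 0 (l.length : Int) 1).filter
            (fun x => decide (last < x))) (m+1)) := by
      apply List.filter_congr
      intro c _
      cases c <;> simp [chainFrom]
    rw [hmatch, combos_filter_split l r _ hpw m (fun j => pyAtD l last * r == pyAtD l j)]
    rw [List.map_flatMap]
    rw [List.filter_filter]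
    have hpred : ∀ a, ((a ∈ PySem.List.pyRange 0 (l.length : Int) 1)) →
        (decide (last < a) && (pyAtD l a == pyAtD l last * r))
          = ((pyAtD l last * r == pyAtD l a) && decide (last < a)) := by
      intro a _; rw [Bool.and_comm, Bool.beq_comm]
    rw [List.filter_congr hpred]
    apply List.flatMap_congr
    intro j hj
    have hj2 := List.mem_filter.mp hj
    have hlastj : last < j := by
      have := hj2.2
      simp only [Bool.and_eq_true, decide_eq_true_eq] at this
      exact this.2
    -- inner double filter collapses: j > last, so (last < x) is implied by (j < x)
    have hff : List.filter (fun x => decide (j < x))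
          (List.filter (fun x => decide (last < x)) (PySem.List.pyRange 0 (l.length : Int) 1))
        = List.filter (fun x => decide (j < x)) (PySem.List.pyRange 0 (l.length : Int) 1) := by
      rw [List.filter_filter]
      apply List.filter_congr
      intro x _
      by_cases hx : j < x
      · simp [hx, lt_trans hlastj hx]
      · simp [hx]
    rw [hff, ih (chain ++ [j]) j, List.map_map]
    apply List.map_congr_left
    intro t _
    simp only [Function.comp_def]
    exact (List.append_cons chain j t).symm

theorem main_eq (l : List Int) (r : Int) (k : Int) (hk : 0 ≤ k) :
    find_geometric_progression_k_tuples_bf l r k = find_geometric_progression_k_tuples_bf_alt l r k := by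
  simp only [find_geometric_progression_k_tuples_bf, find_geometric_progression_k_tuples_bf_alt]
  rw [if_pos hk, if_neg (by omega : ¬ k < 0)]
  rw [PySem.List.foldl_append_if
    (fun comb => k == 1 || (PySem.List.pyRange 1 k 1).all
      (fun i => pyAtD l (pyAtD comb (i - 1)) * r == pyAtD l (pyAtD comb i))) (fun c => c)]
  simp only [List.map_id_fun', List.nil_append, id]
  by_cases hk0 : k = 0
  · subst hk0
    rw [show Int.toNat 0 = 0 from rfl, PySem.List.combinations_zero]
    simp [PySem.List.pyRange_one_eq_nil (by norm_num : (0:Int) ≤ 1)]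
  · rw [if_neg (by simpa using hk0)]
    -- A's comprehension condition is chainOK, elementwise on the combinations
    have hcond : List.filter
        (fun comb => k == 1 || (PySem.List.pyRange 1 k 1).all
          (fun i => pyAtD l (pyAtD comb (i - 1)) * r == pyAtD l (pyAtD comb i)))
        (PySem.List.combinations (PySem.List.pyRange 0 (l.length : Int) 1) k.toNat)
        = List.filter (chainOK l r)
          (PySem.List.combinations (PySem.List.pyRange 0 (l.length : Int) 1) k.toNat) := by
      apply List.filter_congr
      intro c hc
      have hlen : c.length = k.toNat := PySem.List.length_of_mem_combinations hc
      have hlen' : (c.length : Int) = k := by omega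
      rw [← hlen', cond_eq_chainOK l r c]
      by_cases hk1 : k = 1
      · rcases List.length_eq_one_iff.mp (by omega : c.length = 1) with ⟨a, rfl⟩
        simp [chainOK, chainFrom]
      · have hne : ((c.length : Int) == 1) = false := by simp; omega
        rw [hne, Bool.false_or]
    rw [hcond]
    have hm : k.toNat = (k - 1).toNat + 1 := by omega
    have hOKmatch : List.filter (chainOK l r)
        (PySem.List.combinations (PySem.List.pyRange 0 (l.length : Int) 1) k.toNat)
        = List.filter (fun c => match c with
            | [] => true
            | j :: t => (fun _ => true) j && chainFrom l r (pyAtD l j) t)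
          (PySem.List.combinations (PySem.List.pyRange 0 (l.length : Int) 1) k.toNat) := by
      apply List.filter_congr
      intro c _
      cases c <;> simp [chainOK]
    rw [hOKmatch, hm, combos_filter_split l r _ (PySem.List.pairwise_lt_pyRange_one 0 _)
      ((k - 1).toNat) (fun _ => true)]
    rw [List.filter_true]
    apply List.flatMap_congr
    intro i _
    rw [dfsB_eq]
    apply List.map_congr_left
    intro t _
    simp

-- ===== VERDICT (by name: the statement is the Claim_ definition above) =====
theorem find_geometric_progression_k_tuples_bf_spec : Claim_equal_find_geometric_progression_k_tuples_bf := by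
  intro l r k _ hk
  unfold Spec_find_geometric_progression_k_tuples_bf
  exact main_eq l r k hk
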